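-- pv_equiv track=rewrite | github.com/EmmettJT/procedural_replay_paper_2026 | figure3/Utilities/utils.py | find_closest_example
-- ===== SOURCE A (Python) =====
-- def find_closest_example(numbers, examples):
--     # Initialize dictionaries to store the closest example and example totals
--     closest_examples = {}
--     example_totals = {example: 0 for example in examples}
--
--     # Iterate over each number in the list
--     for number in numbers:
--         # Initialize a variable to keep track of the closest example
--         closest_example = None
--         min_distance = float('inf')  # Initialize the minimum distance to infinity
--
--         # Compare the number with each example
--         for example in examples:
--             # Calculate the absolute difference between the number and example
--             distance = abs(number - example)
--
--             # Check if the current example is closer than the previous closest example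
--             if distance < min_distance:
--                 min_distance = distance
--                 closest_example = example
--
--         # Update the closest example for the current number in the dictionary
--         closest_examples[number] = closest_example
--
--         # Increment the total count for the closest example
--         example_totals[closest_example] += 1
--
--     return closest_examples, example_totals
-- ===== SOURCE B (Python) =====
-- def find_closest_example(numbers, examples):
--     # Index of the first occurrence of each distinct example value.
--     first = {}
--     for i, example in enumerate(examples):
--         if example not in first:
--             first[example] = i
--     # Distinct example values in ascending order, for binary search.
--     svals = sorted(first)
--
--     closest_examples = {}
--     example_totals = {example: 0 for example in examples}
--
--     for number in numbers:
--         # bisect_left by hand: first index with svals[lo] >= number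
--         lo, hi = 0, len(svals)
--         while lo < hi:
--             mid = (lo + hi) // 2
--             if svals[mid] < number:
--                 lo = mid + 1
--             else:
--                 hi = mid
--         # The closest value is one of the two neighbours; ties go to the
--         # value whose first occurrence in `examples` comes earlier.
--         best = None
--         best_v = None
--         for k in (lo - 1, lo):
--             if 0 <= k < len(svals):
--                 v = svals[k]
--                 cand = (abs(number - v), first[v])
--                 if best is None or cand < best:
--                     best = cand
--                     best_v = v
--         closest_examples[number] = best_v
--         example_totals[best_v] += 1
--
--     return closest_examples, example_totals
-- ===== Notes on version B (the rewrite author's own statement) =====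
-- stated objective: faster
-- what changed: Instead of scanning all examples for every number, B builds a first-occurrence index of the distinct example values once, sorts them, and finds each number's nearest value by binary search over the sorted values, resolving ties by the earlier first occurrence in the original list.
import Mathlib
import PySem

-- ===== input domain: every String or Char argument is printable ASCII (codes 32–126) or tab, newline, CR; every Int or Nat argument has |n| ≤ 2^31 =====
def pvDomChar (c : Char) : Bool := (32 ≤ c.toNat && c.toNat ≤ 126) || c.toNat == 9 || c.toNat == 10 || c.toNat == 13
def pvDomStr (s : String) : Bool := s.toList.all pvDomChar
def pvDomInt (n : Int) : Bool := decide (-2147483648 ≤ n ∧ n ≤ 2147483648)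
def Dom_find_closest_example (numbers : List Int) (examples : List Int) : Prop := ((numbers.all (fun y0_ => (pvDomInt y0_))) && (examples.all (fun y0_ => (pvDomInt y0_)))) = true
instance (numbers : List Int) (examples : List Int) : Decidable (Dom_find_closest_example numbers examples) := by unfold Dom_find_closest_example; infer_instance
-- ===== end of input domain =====

-- B replaces A's per-number linear scan of `examples` by a sorted list of the
-- distinct example values and a binary search per number (ties resolved by the
-- earlier first occurrence in `examples`); objective: faster (asymptotic).

-- ===== PORT A =====
-- inner-loop body of A (state = (closest_example, min_distance); Python's None/inf start = (none, none))
def pvStepA (number : Int) (st : Option Int × Option Int) (ex : Int) : Option Int × Option Int :=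
  let distance := |number - ex|
  match st.2 with
  | none => (some ex, some distance)
  | some m => if distance < m then (some ex, some distance) else st

-- A's inner loop over `examples` for one `number`
def pvPickA (number : Int) (examples : List Int) : Option Int :=
  (examples.foldl (pvStepA number) (none, none)).1

def find_closest_example (numbers : List Int) (examples : List Int) : (List (Int × Int)) × (List (Int × Int)) :=
  let example_totals : PySem.Dict Int Int :=
    examples.foldl (fun d ex => d.insert ex 0) PySem.Dict.empty
  let r :=
    numbers.foldl
      (fun (st : PySem.Dict Int Int × PySem.Dict Int Int) number =>
        match pvPickA number examples with
        | some closest_example =>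
            (st.1.insert number closest_example,
             st.2.modify closest_example 0 (· + 1))   -- the key is always present here; on a missing key Python raises KeyError, excluded by Pre_
        | none => st)                                 -- unreachable under Pre_: closest_example is None only if examples == [], and Python then raises KeyError
      (PySem.Dict.empty, example_totals)
  (r.1.items, r.2.items)

-- ===== PORT B =====
-- hand-written bisect_left while-loop of Source B (svals[mid] is in range whenever lo < hi ≤ len)
def pvBisect (svals : List Int) (number : Int) (lo hi : Nat) : Nat :=
  if h : lo < hi then
    let mid := (lo + hi) / 2
    if svals.getD mid 0 < number then pvBisect svals number (mid + 1) hi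
    else pvBisect svals number lo mid
  else lo
termination_by hi - lo
decreasing_by all_goals omega

-- candidate-loop body of Source B (state = (best, best_v); None start = none)
def pvStepB (first : PySem.Dict Int Int) (svals : List Int) (number : Int)
    (st : Option ((Int × Int) × Int)) (k : Int) : Option ((Int × Int) × Int) :=
  if 0 ≤ k ∧ k < (svals.length : Int) then
    let v := svals.getD k.toNat 0
    let cand := (|number - v|, first.getD v 0)   -- key v is always present in `first`
    match st with
    | none => some (cand, v)
    | some (b, _) =>
        if cand.1 < b.1 ∨ (cand.1 = b.1 ∧ cand.2 < b.2) then some (cand, v) else st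
  else st

-- Source B's per-number search: bisect, then lex-min over the two neighbours
def pvPickB (first : PySem.Dict Int Int) (svals : List Int) (number : Int) : Option Int :=
  let lo := pvBisect svals number 0 svals.length
  (([(lo : Int) - 1, (lo : Int)].foldl (pvStepB first svals number) none).map (·.2))

def find_closest_example_alt (numbers : List Int) (examples : List Int) : (List (Int × Int)) × (List (Int × Int)) :=
  let first : PySem.Dict Int Int :=
    (PySem.List.enumerate examples 0).foldl
      (fun d p => if d.contains p.2 then d else d.insert p.2 p.1) PySem.Dict.empty
  let svals : List Int := PySem.List.sorted first.keys (fun x => x) false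
  let example_totals : PySem.Dict Int Int :=
    examples.foldl (fun d ex => d.insert ex 0) PySem.Dict.empty
  let r :=
    numbers.foldl
      (fun (st : PySem.Dict Int Int × PySem.Dict Int Int) number =>
        match pvPickB first svals number with
        | some best_v =>
            (st.1.insert number best_v,
             st.2.modify best_v 0 (· + 1))   -- key always present
        | none => st)                        -- unreachable under Pre_: svals == [] only if examples == []
      (PySem.Dict.empty, example_totals)
  (r.1.items, r.2.items)

-- ===== PRECONDITION & SPEC =====
-- Pre_ excludes only the inputs where Python A raises: a nonempty `numbers` with
-- empty `examples` makes closest_example None and `example_totals[None]` a KeyError.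
def Pre_find_closest_example (numbers : List Int) (examples : List Int) : Prop :=
  numbers = [] ∨ examples ≠ []
instance (numbers : List Int) (examples : List Int) : Decidable (Pre_find_closest_example numbers examples) := by unfold Pre_find_closest_example; infer_instance

def pvWitness_find_closest_example : List Int × List Int := ([1, -3, 4], [0, 5, 0])

def Spec_find_closest_example (numbers : List Int) (examples : List Int) (out : (List (Int × Int)) × (List (Int × Int))) : Prop := out = find_closest_example_alt numbers examples
instance (numbers : List Int) (examples : List Int) (out : (List (Int × Int)) × (List (Int × Int))) : Decidable (Spec_find_closest_example numbers examples out) := by unfold Spec_find_closest_example; infer_instance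

-- ===== CLAIM (what is proved, stated in full; the proofs are below) =====
def Claim_equal_find_closest_example : Prop := ∀ (numbers : List Int) (examples : List Int), Dom_find_closest_example numbers examples → Pre_find_closest_example numbers examples → Spec_find_closest_example numbers examples (find_closest_example numbers examples)

-- ===== LEMMAS AND PROOFS =====

-- `w` is the value both inner loops must return: an element of `examples` beating
-- every element lexicographically by (distance to `number`, index of first occurrence).
def pvLex (number : Int) (examples : List Int) (w : Int) : Prop :=
  w ∈ examples ∧ ∀ u ∈ examples,
    |number - w| < |number - u| ∨
    (|number - w| = |number - u| ∧ examples.idxOf w ≤ examples.idxOf u)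

theorem pvLex_unique {number : Int} {examples : List Int} {w u : Int}
    (hw : pvLex number examples w) (hu : pvLex number examples u) : w = u := by
  obtain ⟨hwm, hwp⟩ := hw
  obtain ⟨hum, hup⟩ := hu
  rcases hwp u hum with h1 | ⟨h1, h2⟩
  · rcases hup w hwm with h3 | ⟨h3, _⟩ <;> omega
  · rcases hup w hwm with h3 | ⟨_, h4⟩
    · omega
    · have hidx : examples.idxOf w = examples.idxOf u := le_antisymm h2 h4
      have hwlt := List.idxOf_lt_length_iff.mpr hwm
      have hult := List.idxOf_lt_length_iff.mpr hum
      have e1 : examples[examples.idxOf w]? = some w := by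
        rw [List.getElem?_eq_getElem hwlt, List.getElem_idxOf]
      have e2 : examples[examples.idxOf u]? = some u := by
        rw [List.getElem?_eq_getElem hult, List.getElem_idxOf]
      rw [hidx, e2] at e1
      exact (Option.some.injEq _ _ ▸ e1).symm ▸ rfl

-- invariant of A's inner loop
theorem pvStepA_fold (number : Int) (l : List Int) :
    ∀ (pre : List Int) (w : Int), w ∈ pre →
    (∀ u ∈ pre, |number - w| < |number - u| ∨
      (|number - w| = |number - u| ∧ (pre ++ l).idxOf w ≤ (pre ++ l).idxOf u)) →
    ∃ w', l.foldl (pvStepA number) (some w, some |number - w|) = (some w', some |number - w'|) ∧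
      pvLex number (pre ++ l) w' := by
  induction l with
  | nil =>
    intro pre w hw hinv
    rw [List.append_nil] at hinv ⊢
    refine ⟨w, rfl, ?_⟩
    unfold pvLex
    exact ⟨hw, hinv⟩
  | cons e l ih =>
    intro pre w hw hinv
    have hl : (pre ++ [e]) ++ l = pre ++ e :: l := by simp
    rw [List.foldl_cons]
    have hstep : pvStepA number (some w, some |number - w|) e =
        if |number - e| < |number - w| then (some e, some |number - e|)
        else (some w, some |number - w|) := by
      simp [pvStepA]
    rw [hstep]
    by_cases hce : |number - e| < |number - w|
    · rw [if_pos hce]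
      have h2 := ih (pre ++ [e]) e (by simp) ?_
      · rw [hl] at h2
        exact h2
      · rw [hl]
        intro u hu
        rcases List.mem_append.mp hu with hup | hue
        · left
          rcases hinv u hup with h' | ⟨h', _⟩ <;> omega
        · simp only [List.mem_singleton] at hue
          subst hue
          right
          exact ⟨rfl, le_refl _⟩
    · rw [if_neg hce]
      have h2 := ih (pre ++ [e]) w (List.mem_append.mpr (Or.inl hw)) ?_
      · rw [hl] at h2
        exact h2
      · rw [hl]
        intro u hu
        rcases List.mem_append.mp hu with hup | hue
        · exact hinv u hup
        · simp only [List.mem_singleton] at hue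
          subst hue
          have hle : |number - w| ≤ |number - u| := not_lt.mp hce
          rcases lt_or_eq_of_le hle with h' | h'
          · exact Or.inl h'
          · right
            refine ⟨h', ?_⟩
            by_cases hep : u ∈ pre
            · rcases hinv u hep with h'' | ⟨_, h''⟩
              · omega
              · exact h''
            · rw [List.idxOf_append, List.idxOf_append]
              simp only [hw, if_true, hep, if_false, List.idxOf_cons_self]
              have := List.idxOf_lt_length_iff.mpr hw
              omega

theorem pvPickA_lex (number : Int) (examples : List Int) (h : examples ≠ []) :
    ∃ w, pvPickA number examples = some w ∧ pvLex number examples w := by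
  rcases examples with _ | ⟨e, es⟩
  · exact absurd rfl h
  unfold pvPickA
  rw [List.foldl_cons]
  have hstep : pvStepA number (none, none) e = (some e, some |number - e|) := by
    simp [pvStepA]
  rw [hstep]
  obtain ⟨w', hfold, hlex⟩ := pvStepA_fold number es [e] e (by simp)
    (fun u hu => by
      simp only [List.mem_singleton] at hu
      subst hu
      exact Or.inr ⟨rfl, le_refl _⟩)
  rw [List.singleton_append] at hlex
  exact ⟨w', by rw [hfold], hlex⟩

-- the first-occurrence dict: get? characterisation
theorem pvFirst_get? (l : List Int) :
    ∀ (s : Int) (d : PySem.Dict Int Int) (v : Int),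
    ((PySem.List.enumerate l s).foldl
      (fun d p => if d.contains p.2 then d else d.insert p.2 p.1) d).get? v
    = if d.contains v then d.get? v
      else if v ∈ l then some (s + l.idxOf v) else none := by
  induction l with
  | nil =>
    intro s d v
    simp only [PySem.List.enumerate_nil, List.foldl_nil, List.not_mem_nil, if_false]
    by_cases hv : d.contains v
    · simp [hv]
    · simp only [hv]
      exact (PySem.Dict.get?_eq_none_iff_contains d v).mpr (by simpa using hv)
  | cons x l ih =>
    intro s d v
    rw [PySem.List.enumerate_cons, List.foldl_cons]
    rw [ih (s + 1) _ v]
    by_cases hvx : v = x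
    · subst hvx
      by_cases hd : d.contains v
      · simp [hd]
      · simp [hd]
    · have hne : (v == x) = false := by simp [hvx]
      by_cases hd : d.contains x
      · simp only [hd, if_true]
        by_cases hv : d.contains v
        · simp [hv]
        · simp only [hv, List.mem_cons, hvx, false_or]
          by_cases hvl : v ∈ l
          · simp only [hvl, List.idxOf_cons_ne _ (by simpa using (Ne.symm hvx))]
            push_cast; ring_nf
          · simp [hvl]
      · simp only [hd, Bool.false_eq_true, if_false]
        have c1 : (d.insert x s).contains v = d.contains v := by
          rw [PySem.Dict.contains_insert]; simp [hne]
        have c2 : (d.insert x s).get? v = d.get? v := by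
          rw [PySem.Dict.get?_insert]; simp [hvx]
        rw [c1, c2]
        by_cases hv : d.contains v
        · simp [hv]
        · simp only [hv, List.mem_cons, hvx, false_or]
          by_cases hvl : v ∈ l
          · simp only [hvl, List.idxOf_cons_ne _ (by simpa using (Ne.symm hvx))]
            push_cast; ring_nf
          · simp [hvl]

theorem pvFirst_nodup_keys (l : List (Int × Int)) :
    ∀ (d : PySem.Dict Int Int), d.keys.Nodup →
    (l.foldl (fun d p => if d.contains p.2 then d else d.insert p.2 p.1) d).keys.Nodup := by
  induction l with
  | nil => intro d hd; exact hd
  | cons x l ih =>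
    intro d hd
    simp only [List.foldl_cons]
    by_cases hx : d.contains x.2
    · simp only [hx, if_true]; exact ih d hd
    · simp only [hx]; exact ih _ (PySem.Dict.nodup_keys_insert d x.2 x.1 hd)

-- turning the bisect result + candidate comparison into the pvLex property
theorem pvLexAux (svals examples : List Int) (number : Int) (first : PySem.Dict Int Int) (lo : Nat)
    (hmem : ∀ v, v ∈ svals ↔ v ∈ examples)
    (hfidx : ∀ v ∈ examples, first.getD v 0 = (examples.idxOf v : Int))
    (hmono : ∀ (p q : Nat) (hp : p < svals.length) (hq : q < svals.length), p < q → svals[p] < svals[q])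
    (hlo : lo ≤ svals.length)
    (hlt : ∀ (i : Nat) (h : i < svals.length), i < lo → svals[i] < number)
    (hge : ∀ (i : Nat) (h : i < svals.length), lo ≤ i → number ≤ svals[i])
    (v : Int) (hv : v ∈ svals)
    (hbeat : ∀ (k : Nat) (hk : k < svals.length), ((k = lo - 1 ∧ 0 < lo) ∨ (k = lo ∧ lo < svals.length)) →
      |number - v| < |number - svals[k]| ∨
      (|number - v| = |number - svals[k]| ∧ first.getD v 0 ≤ first.getD svals[k] 0)) :
    pvLex number examples v := by
  have hvex : v ∈ examples := (hmem v).mp hv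
  unfold pvLex
  refine ⟨hvex, fun u hu => ?_⟩
  have hus : u ∈ svals := (hmem u).mpr hu
  obtain ⟨j, hj, rfl⟩ := List.getElem_of_mem hus
  by_cases hjlo : j < lo
  · have h0lo : 0 < lo := by omega
    have hk : lo - 1 < svals.length := by omega
    have hb := hbeat (lo - 1) hk (Or.inl ⟨rfl, h0lo⟩)
    by_cases hje : j = lo - 1
    · subst hje
      rcases hb with h' | ⟨h', h''⟩
      · exact Or.inl h'
      · refine Or.inr ⟨h', ?_⟩
        rw [hfidx v hvex, hfidx _ hu] at h''
        exact_mod_cast h''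
    · left
      have hmlt : svals[j] < svals[lo - 1] := hmono j (lo - 1) hj hk (by omega)
      have h1 : svals[j] < number := hlt j hj hjlo
      have h2 : svals[lo - 1] < number := hlt (lo - 1) hk (by omega)
      have hv1 : |number - v| ≤ |number - svals[lo - 1]| := by
        rcases hb with h' | ⟨h', _⟩
        · exact le_of_lt h'
        · exact le_of_eq h'
      have a1 : |number - svals[lo - 1]| = number - svals[lo - 1] := abs_of_pos (by omega)
      have a2 : |number - svals[j]| = number - svals[j] := abs_of_pos (by omega)
      rw [a1] at hv1
      rw [a2]
      linarith
  · have hlolen : lo < svals.length := by omega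
    have hb := hbeat lo hlolen (Or.inr ⟨rfl, hlolen⟩)
    by_cases hje : j = lo
    · subst hje
      rcases hb with h' | ⟨h', h''⟩
      · exact Or.inl h'
      · refine Or.inr ⟨h', ?_⟩
        rw [hfidx v hvex, hfidx _ hu] at h''
        exact_mod_cast h''
    · left
      have hmlt : svals[lo] < svals[j] := hmono lo j hlolen hj (by omega)
      have h1 : number ≤ svals[j] := hge j hj (by omega)
      have h2 : number ≤ svals[lo] := hge lo hlolen (le_refl _)
      have hv1 : |number - v| ≤ |number - svals[lo]| := by
        rcases hb with h' | ⟨h', _⟩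
        · exact le_of_lt h'
        · exact le_of_eq h'
      have a1 : |number - svals[lo]| = -(number - svals[lo]) := abs_of_nonpos (by omega)
      have a2 : |number - svals[j]| = -(number - svals[j]) := abs_of_nonpos (by omega)
      rw [a1] at hv1
      rw [a2]
      linarith

theorem pvBisect_spec (svals : List Int) (number : Int)
    (hmono : ∀ (p q : Nat) (hp : p < svals.length) (hq : q < svals.length), p ≤ q → svals[p] ≤ svals[q]) :
    ∀ (fuel lo hi : Nat), hi - lo ≤ fuel → hi ≤ svals.length → lo ≤ hi →
    (∀ (i : Nat) (h : i < svals.length), i < lo → svals[i] < number) →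
    (∀ (i : Nat) (h : i < svals.length), hi ≤ i → number ≤ svals[i]) →
    lo ≤ pvBisect svals number lo hi ∧ pvBisect svals number lo hi ≤ hi ∧
    (∀ (i : Nat) (h : i < svals.length), i < pvBisect svals number lo hi → svals[i] < number) ∧
    (∀ (i : Nat) (h : i < svals.length), pvBisect svals number lo hi ≤ i → number ≤ svals[i]) := by
  intro fuel
  induction fuel with
  | zero =>
    intro lo hi hfuel hhl hlh hlt hge
    have : lo = hi := by omega
    subst this
    rw [pvBisect]
    simp only [lt_irrefl, dite_false]
    exact ⟨le_refl _, le_refl _, hlt, hge⟩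
  | succ fuel ih =>
    intro lo hi hfuel hhl hlh hlt hge
    by_cases hlohi : lo < hi
    · rw [pvBisect]
      simp only [hlohi, dite_true]
      have hmid : (lo + hi) / 2 < hi := by omega
      have hmidlo : lo ≤ (lo + hi) / 2 := by omega
      have hmlen : (lo + hi) / 2 < svals.length := by omega
      rw [List.getD_eq_getElem svals 0 hmlen]
      split_ifs with hcmp
      · have h1 := ih ((lo + hi) / 2 + 1) hi (by omega) hhl (by omega)
          (fun i hi' hilt => by
            rcases Nat.lt_or_ge i lo with hc | hc
            · exact hlt i hi' hc
            · exact lt_of_le_of_lt (hmono i ((lo + hi) / 2) hi' hmlen (by omega)) hcmp)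
          hge
        exact ⟨by omega, by omega, h1.2.2.1, h1.2.2.2⟩
      · have h1 := ih lo ((lo + hi) / 2) (by omega) (by omega) (by omega) hlt
          (fun i hi' hile => le_trans (not_lt.mp hcmp) (hmono ((lo + hi) / 2) i hmlen hi' hile))
        exact ⟨h1.1, by omega, h1.2.2.1, h1.2.2.2⟩
    · rw [pvBisect]
      simp only [hlohi, dite_false]
      have : lo = hi := by omega
      exact ⟨le_refl _, by omega, hlt, fun i hi' hge' => hge i hi' (by omega)⟩

theorem pvPickB_lex (number : Int) (examples : List Int) (h : examples ≠ [])
    (first : PySem.Dict Int Int) (svals : List Int)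
    (hf : first = (PySem.List.enumerate examples 0).foldl
      (fun d p => if d.contains p.2 then d else d.insert p.2 p.1) PySem.Dict.empty)
    (hs : svals = PySem.List.sorted first.keys (fun x => x) false) :
    ∃ w, pvPickB first svals number = some w ∧ pvLex number examples w := by
  have hget : ∀ v, first.get? v = if v ∈ examples then some ((examples.idxOf v : Int)) else none := by
    intro v
    rw [hf, pvFirst_get? examples 0 PySem.Dict.empty v]
    simp [PySem.Dict.contains_empty]
  have hfidx : ∀ v ∈ examples, first.getD v 0 = (examples.idxOf v : Int) := by
    intro v hv
    rw [PySem.Dict.getD_eq_get?_getD, hget v]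
    simp [hv]
  have hkeys : ∀ v, v ∈ first.keys ↔ v ∈ examples := by
    intro v
    constructor
    · intro hk
      by_contra hx
      have : first.get? v = none := by rw [hget v]; simp [hx]
      exact (PySem.Dict.get?_eq_none_iff_not_mem_keys first v).mp this hk
    · intro hx
      by_contra hk
      have := (PySem.Dict.get?_eq_none_iff_not_mem_keys first v).mpr hk
      rw [hget v] at this
      simp [hx] at this
  have hnodupK : first.keys.Nodup := by
    rw [hf]
    exact pvFirst_nodup_keys _ PySem.Dict.empty PySem.Dict.nodup_keys_empty
  have hperm : svals.Perm first.keys := hs ▸ PySem.List.sorted_perm first.keys (fun x => x) false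
  have hmem : ∀ v, v ∈ svals ↔ v ∈ examples := fun v => hperm.mem_iff.trans (hkeys v)
  have hnodupS : svals.Nodup := hperm.symm.nodup hnodupK
  have hpw : svals.Pairwise (· < ·) := by
    have hle : svals.Pairwise (fun a b => a ≤ b) := by
      rw [hs]
      exact PySem.List.sorted_pairwise first.keys (fun x => x)
    exact (hle.and hnodupS).imp (fun hab => lt_of_le_of_ne hab.1 hab.2)
  have hmonolt : ∀ (p q : Nat) (hp : p < svals.length) (hq : q < svals.length), p < q → svals[p] < svals[q] :=
    fun p q hp hq hpq => List.pairwise_iff_getElem.mp hpw p q hp hq hpq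
  have hmonole : ∀ (p q : Nat) (hp : p < svals.length) (hq : q < svals.length), p ≤ q → svals[p] ≤ svals[q] := by
    intro p q hp hq hpq
    rcases Nat.lt_or_ge p q with h' | h'
    · exact le_of_lt (hmonolt p q hp hq h')
    · have : p = q := by omega
      subst this
      exact le_refl _
  have hlen : 0 < svals.length := by
    obtain ⟨e, he⟩ := List.exists_mem_of_ne_nil examples h
    have : e ∈ svals := (hmem e).mpr he
    exact List.length_pos_of_mem this
  suffices H : ∀ (lo : Nat), lo ≤ svals.length →
      (∀ (i : Nat) (hi : i < svals.length), i < lo → svals[i] < number) →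
      (∀ (i : Nat) (hi : i < svals.length), lo ≤ i → number ≤ svals[i]) →
      ∃ w, (([(lo : Int) - 1, (lo : Int)].foldl (pvStepB first svals number) none).map (·.2)) = some w ∧
        pvLex number examples w by
    obtain ⟨h1, h2, h3, h4⟩ := pvBisect_spec svals number hmonole svals.length 0 svals.length
      (by omega) (le_refl _) (by omega)
      (fun i hi hi0 => absurd hi0 (by omega))
      (fun i hi hh => absurd hi (Nat.not_lt.mpr hh))
    exact H (pvBisect svals number 0 svals.length) h2 h3 h4
  intro lo hlole hblt hbge
  simp only [List.foldl_cons, List.foldl_nil]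
  by_cases h0 : lo = 0
  · subst h0
    have e1 : pvStepB first svals number none ((0 : Nat) - 1 : Int) = none := by
      rw [pvStepB, if_neg]
      intro hc
      omega
    have e2 : pvStepB first svals number none ((0 : Nat) : Int) =
        some ((|number - svals[0]|, first.getD svals[0] 0), svals[0]) := by
      rw [pvStepB, if_pos (by constructor <;> omega)]
      simp only [Int.toNat_natCast]
      rw [List.getD_eq_getElem svals 0 hlen]
    rw [e1, e2]
    refine ⟨svals[0], rfl, ?_⟩
    refine pvLexAux svals examples number first 0 hmem hfidx hmonolt (by omega) hblt hbge
      svals[0] (List.getElem_mem hlen) ?_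
    intro k hk hcand
    rcases hcand with ⟨_, hfalse⟩ | ⟨hke, _⟩
    · omega
    · subst hke
      exact Or.inr ⟨rfl, le_refl _⟩
  · have hlo1 : lo - 1 < svals.length := by omega
    have ht1 : (((lo : Nat) : Int) - 1).toNat = lo - 1 := by omega
    have e1 : pvStepB first svals number none (((lo : Nat) : Int) - 1) =
        some ((|number - svals[lo - 1]|, first.getD svals[lo - 1] 0), svals[lo - 1]) := by
      rw [pvStepB, if_pos (by constructor <;> omega)]
      simp only [ht1]
      rw [List.getD_eq_getElem svals 0 hlo1]
    rw [e1]
    by_cases hN : lo < svals.length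
    · have e2 : pvStepB first svals number
          (some ((|number - svals[lo - 1]|, first.getD svals[lo - 1] 0), svals[lo - 1])) ((lo : Nat) : Int) =
          if |number - svals[lo]| < |number - svals[lo - 1]| ∨
            (|number - svals[lo]| = |number - svals[lo - 1]| ∧
              first.getD svals[lo] 0 < first.getD svals[lo - 1] 0) then
            some ((|number - svals[lo]|, first.getD svals[lo] 0), svals[lo])
          else some ((|number - svals[lo - 1]|, first.getD svals[lo - 1] 0), svals[lo - 1]) := by
        rw [pvStepB, if_pos (by constructor <;> omega)]
        simp only [Int.toNat_natCast]
        rw [List.getD_eq_getElem svals 0 hN]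
      rw [e2]
      by_cases hcmp : |number - svals[lo]| < |number - svals[lo - 1]| ∨
          (|number - svals[lo]| = |number - svals[lo - 1]| ∧
            first.getD svals[lo] 0 < first.getD svals[lo - 1] 0)
      · rw [if_pos hcmp]
        refine ⟨svals[lo], rfl, ?_⟩
        refine pvLexAux svals examples number first lo hmem hfidx hmonolt (by omega) hblt hbge
          svals[lo] (List.getElem_mem hN) ?_
        intro k hk hcand
        rcases hcand with ⟨hke, _⟩ | ⟨hke, _⟩
        · subst hke
          rcases hcmp with h' | ⟨h', h''⟩
          · exact Or.inl h'
          · exact Or.inr ⟨h', le_of_lt h''⟩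
        · subst hke
          exact Or.inr ⟨rfl, le_refl _⟩
      · rw [if_neg hcmp]
        rw [not_or, not_lt, not_and] at hcmp
        simp only [not_lt] at hcmp
        obtain ⟨hc1, hc2⟩ := hcmp
        refine ⟨svals[lo - 1], rfl, ?_⟩
        refine pvLexAux svals examples number first lo hmem hfidx hmonolt (by omega) hblt hbge
          svals[lo - 1] (List.getElem_mem hlo1) ?_
        intro k hk hcand
        rcases hcand with ⟨hke, _⟩ | ⟨hke, _⟩
        · subst hke
          exact Or.inr ⟨rfl, le_refl _⟩
        · subst hke
          rcases lt_or_eq_of_le hc1 with h' | h'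
          · exact Or.inl h'
          · exact Or.inr ⟨h', hc2 h'.symm⟩
    · have hloN : lo = svals.length := by omega
      have e2 : pvStepB first svals number
          (some ((|number - svals[lo - 1]|, first.getD svals[lo - 1] 0), svals[lo - 1])) ((lo : Nat) : Int) =
          some ((|number - svals[lo - 1]|, first.getD svals[lo - 1] 0), svals[lo - 1]) := by
        rw [pvStepB, if_neg]
        intro hc
        omega
      rw [e2]
      refine ⟨svals[lo - 1], rfl, ?_⟩
      refine pvLexAux svals examples number first lo hmem hfidx hmonolt (by omega) hblt hbge
        svals[lo - 1] (List.getElem_mem hlo1) ?_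
      intro k hk hcand
      rcases hcand with ⟨hke, _⟩ | ⟨_, hfalse⟩
      · subst hke
        exact Or.inr ⟨rfl, le_refl _⟩
      · omega

theorem pvFoldl_ext {α β : Type} (f g : α → β → α) (h : ∀ a b, f a b = g a b)
    (l : List β) (init : α) : l.foldl f init = l.foldl g init := by
  have : f = g := funext fun a => funext (h a)
  rw [this]

-- ===== VERDICT (by name: the statement is the Claim_ definition above) =====
theorem find_closest_example_spec : Claim_equal_find_closest_example := by
  intro numbers examples _ hpre
  unfold Spec_find_closest_example
  by_cases hex : examples = []
  · have hnum : numbers = [] := by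
      rcases hpre with h | h
      · exact h
      · exact absurd hex h
    subst hex; subst hnum; rfl
  · have hpick : ∀ n, pvPickA n examples =
        pvPickB ((PySem.List.enumerate examples 0).foldl
          (fun d p => if d.contains p.2 then d else d.insert p.2 p.1) PySem.Dict.empty)
          (PySem.List.sorted ((PySem.List.enumerate examples 0).foldl
            (fun d p => if d.contains p.2 then d else d.insert p.2 p.1) PySem.Dict.empty).keys
            (fun x => x) false) n := by
      intro n
      obtain ⟨w, hw, hlw⟩ := pvPickA_lex n examples hex
      obtain ⟨w', hw', hlw'⟩ := pvPickB_lex n examples hex _ _ rfl rfl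
      rw [hw, hw', pvLex_unique hlw hlw']
    show (_, _) = (_, _)
    have := pvFoldl_ext
      (fun (st : PySem.Dict Int Int × PySem.Dict Int Int) number =>
        match pvPickA number examples with
        | some c => (st.1.insert number c, st.2.modify c 0 (· + 1))
        | none => st)
      (fun (st : PySem.Dict Int Int × PySem.Dict Int Int) number =>
        match pvPickB ((PySem.List.enumerate examples 0).foldl
          (fun d p => if d.contains p.2 then d else d.insert p.2 p.1) PySem.Dict.empty)
          (PySem.List.sorted ((PySem.List.enumerate examples 0).foldl
            (fun d p => if d.contains p.2 then d else d.insert p.2 p.1) PySem.Dict.empty).keys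
            (fun x => x) false) number with
        | some c => (st.1.insert number c, st.2.modify c 0 (· + 1))
        | none => st)
      (fun st n => by beta_reduce; rw [hpick n]) numbers
      (PySem.Dict.empty, examples.foldl (fun d ex => d.insert ex 0) PySem.Dict.empty)
    rw [this]
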